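-- pv_equiv track=rewrite | github.com/usnavy13/LibreCodeInterpreter | skills/docx/scripts/fill_template.py | _smart_quotes
-- ===== SOURCE A (Python) =====
-- def _smart_quotes(text: str) -> str:
--     """Convert ASCII apostrophes and quotes to smart (typographic) equivalents."""
--     if not text:
--         return text
--     # Apostrophe: ' → ' (right single quote U+2019)
--     text = text.replace("\u0027", "\u2019")
--     # Double quotes: simplistic approach — alternate left/right
--     result = []
--     open_dq = True
--     for ch in text:
--         if ch == '"':
--             result.append("\u201C" if open_dq else "\u201D")
--             open_dq = not open_dq
--         else:
--             result.append(ch)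
--     return "".join(result)
-- ===== SOURCE B (Python) =====
-- def _smart_quotes(text: str) -> str:
--     """Convert ASCII apostrophes and quotes to smart (typographic) equivalents.
--
--     Split on '"' and rejoin; the parity of the gap index decides open/close."""
--     parts = text.replace("\u0027", "\u2019").split('"')
--     out = parts[0]
--     for i, seg in enumerate(parts[1:]):
--         out += ("\u201C" if i % 2 == 0 else "\u201D") + seg
--     return out
-- ===== Notes on version B (the rewrite author's own statement) =====
-- stated objective: alternative
-- what changed: Replaces A's per-character loop with an open/close boolean toggle by splitting the text on the double-quote character and rejoining the segments with a quote chosen by the parity of the gap index.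
import Mathlib
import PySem

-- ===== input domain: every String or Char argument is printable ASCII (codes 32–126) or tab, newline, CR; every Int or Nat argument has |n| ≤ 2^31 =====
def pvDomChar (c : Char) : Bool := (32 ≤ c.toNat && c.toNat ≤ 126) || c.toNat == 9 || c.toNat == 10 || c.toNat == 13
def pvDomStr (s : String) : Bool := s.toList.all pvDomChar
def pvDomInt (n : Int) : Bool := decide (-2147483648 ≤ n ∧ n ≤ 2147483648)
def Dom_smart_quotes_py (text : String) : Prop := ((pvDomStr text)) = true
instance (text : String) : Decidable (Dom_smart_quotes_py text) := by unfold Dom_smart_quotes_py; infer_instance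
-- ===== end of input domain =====

-- B replaces A's stateful open/close toggle by split-on-'"' and a rejoin where the
-- parity of the gap index picks the quote character (objective: alternative decomposition).

-- ===== PORT A =====
-- literal port of A: early return on empty, apostrophe replace, then a char loop with an open_dq flag
def smart_quotes_py (text : String) : String :=
  if text = "" then text
  else
    let t := PySem.Chars.replace text.toList ['\''] ['’']
    let r := t.foldl
      (fun (st : List Char × Bool) ch =>
        if ch = '"' then (st.1 ++ [if st.2 then '“' else '”'], !st.2)
        else (st.1 ++ [ch], st.2))
      (([] : List Char), true)
    String.mk r.1

-- ===== PORT B =====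
-- literal port of Source B: replace apostrophes, split on '"', rejoin with parity-chosen quotes
def smart_quotes_py_alt (text : String) : String :=
  let parts := PySem.Chars.splitOn (PySem.Chars.replace text.toList ['\''] ['’']) ['"']
  match parts with
  | [] => ""   -- unreachable: split always returns at least one piece
  | p0 :: rest =>
    String.mk ((PySem.List.enumerate rest).foldl
      (fun out iseg =>
        out ++ ((if PySem.Int.mod iseg.1 2 = 0 then '“' else '”') :: iseg.2))
      p0)

-- ===== PRECONDITION & SPEC =====
def Spec_smart_quotes_py (text : String) (out : String) : Prop := out = smart_quotes_py_alt text
instance (text : String) (out : String) : Decidable (Spec_smart_quotes_py text out) := by unfold Spec_smart_quotes_py; infer_instance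

-- ===== CLAIM (what is proved, stated in full; the proofs are below) =====
def Claim_equal_smart_quotes_py : Prop := ∀ (text : String), Dom_smart_quotes_py text → Spec_smart_quotes_py text (smart_quotes_py text)

-- ===== LEMMAS AND PROOFS =====

-- the value of A's toggle loop, as a structural recursion
def pvG : Bool → List Char → List Char
  | _, [] => []
  | b, c :: cs => if c = '"' then (if b then '“' else '”') :: pvG (!b) cs else c :: pvG b cs

-- split on '"' as a structural recursion
def pvSplitQ : List Char → List (List Char)
  | [] => [[]]
  | c :: cs =>
    if c = '"' then [] :: pvSplitQ cs
    else match pvSplitQ cs with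
      | [] => [[c]]
      | q :: qs => (c :: q) :: qs

-- B's alternating rejoin of the gap segments, index i
def pvAlt : Int → List (List Char) → List Char
  | _, [] => []
  | i, s :: ss => ((if PySem.Int.mod i 2 = 0 then '“' else '”') :: s) ++ pvAlt (i + 1) ss

theorem pvSplitQ_ne_nil (cs : List Char) : pvSplitQ cs ≠ [] := by
  cases cs with
  | nil => simp [pvSplitQ]
  | cons c cs =>
    simp only [pvSplitQ]
    split
    · simp
    · split <;> simp

def pvConsHead (p : List Char) : List (List Char) → List (List Char)
  | [] => [p]
  | q :: qs => (p ++ q) :: qs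

theorem pv_go_eq (l : List Char) : ∀ (fuel : Nat) (cur : List Char) (acc : List (List Char)),
    l.length < fuel →
    PySem.Chars.splitOn.go ['"'] fuel l cur acc = acc.reverse ++ pvConsHead cur.reverse (pvSplitQ l) := by
  induction l with
  | nil =>
    intro fuel cur acc h
    match fuel with
    | f + 1 => simp [PySem.Chars.splitOn.go, pvSplitQ, pvConsHead]
  | cons c rest ih =>
    intro fuel cur acc h
    match fuel with
    | f + 1 =>
      by_cases hc : c = '"'
      · subst hc
        have : (['"'].isPrefixOf ('"' :: rest)) = true := by simp [List.isPrefixOf]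
        simp only [PySem.Chars.splitOn.go, this, if_pos, List.length_singleton, List.drop_succ_cons,
          List.drop_zero]
        rw [ih f [] (cur.reverse :: acc) (by simpa using Nat.lt_of_succ_lt_succ h)]
        obtain ⟨q, qs, hqs⟩ : ∃ q qs, pvSplitQ rest = q :: qs := by
          cases hh : pvSplitQ rest with
          | nil => exact absurd hh (pvSplitQ_ne_nil rest)
          | cons q qs => exact ⟨q, qs, rfl⟩
        simp [pvSplitQ, hqs, pvConsHead]
      · have : (['"'].isPrefixOf (c :: rest)) = false := by
          simp [List.isPrefixOf]; exact fun h' => absurd h'.symm hc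
        simp only [PySem.Chars.splitOn.go, this, Bool.false_eq_true, if_false]
        rw [ih f (c :: cur) acc (by simpa using Nat.lt_of_succ_lt_succ h)]
        obtain ⟨q, qs, hqs⟩ : ∃ q qs, pvSplitQ rest = q :: qs := by
          cases hh : pvSplitQ rest with
          | nil => exact absurd hh (pvSplitQ_ne_nil rest)
          | cons q qs => exact ⟨q, qs, rfl⟩
        simp [pvSplitQ, hc, hqs, pvConsHead]

theorem pv_splitOn_eq (cs : List Char) : PySem.Chars.splitOn cs ['"'] = pvSplitQ cs := by
  unfold PySem.Chars.splitOn
  rw [pv_go_eq cs (cs.length + 1) [] [] (by omega)]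
  obtain ⟨q, qs, hqs⟩ : ∃ q qs, pvSplitQ cs = q :: qs := by
    cases hh : pvSplitQ cs with
    | nil => exact absurd hh (pvSplitQ_ne_nil cs)
    | cons q qs => exact ⟨q, qs, rfl⟩
  simp [hqs, pvConsHead]

-- A's fold computes pvG
theorem pv_foldA (cs : List Char) : ∀ (acc : List Char) (b : Bool),
    (cs.foldl
      (fun (st : List Char × Bool) ch =>
        if ch = '"' then (st.1 ++ [if st.2 then '“' else '”'], !st.2)
        else (st.1 ++ [ch], st.2))
      (acc, b)).1 = acc ++ pvG b cs := by
  induction cs with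
  | nil => intro acc b; simp [pvG]
  | cons c cs ih =>
    intro acc b
    by_cases hc : c = '"'
    · subst hc; simp [List.foldl_cons, ih, pvG]
    · simp [List.foldl_cons, hc, ih, pvG]

-- B's fold computes pvAlt
theorem pv_foldB (rest : List (List Char)) : ∀ (i : Int) (p0 : List Char),
    ((PySem.List.enumerate rest i).foldl
      (fun out iseg =>
        out ++ ((if PySem.Int.mod iseg.1 2 = 0 then '“' else '”') :: iseg.2))
      p0) = p0 ++ pvAlt i rest := by
  induction rest with
  | nil => intro i p0; simp [PySem.List.enumerate, pvAlt]
  | cons s ss ih =>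
    intro i p0
    simp only [PySem.List.enumerate, List.foldl_cons]
    rw [ih]
    simp [pvAlt]

theorem pv_main (cs : List Char) : ∀ (i : Int) (b : Bool),
    ((PySem.Int.mod i 2 = 0) ↔ (b = true)) →
    pvG b cs = (pvSplitQ cs).headI ++ pvAlt i (pvSplitQ cs).tail := by
  induction cs with
  | nil => intro i b _; simp [pvG, pvSplitQ, pvAlt]
  | cons c cs ih =>
    intro i b hb
    by_cases hc : c = '"'
    · subst hc
      obtain ⟨q, qs, hqs⟩ : ∃ q qs, pvSplitQ cs = q :: qs := by
        cases hh : pvSplitQ cs with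
        | nil => exact absurd hh (pvSplitQ_ne_nil cs)
        | cons q qs => exact ⟨q, qs, rfl⟩
      have hflip : (PySem.Int.mod (i + 1) 2 = 0) ↔ ((!b) = true) := by
        rw [PySem.Int.mod_eq_emod_of_pos (by norm_num)] at hb ⊢
        cases b <;> simp_all <;> omega
      have := ih (i + 1) (!b) hflip
      rw [hqs] at this
      simp only [pvG, pvSplitQ, hqs, List.headI, List.tail]
      rw [this]
      have : (if PySem.Int.mod i 2 = 0 then '“' else '”') = (if b then '“' else '”') := by
        cases b <;> simp_all
      simp [pvAlt, ← this]
    · obtain ⟨q, qs, hqs⟩ : ∃ q qs, pvSplitQ cs = q :: qs := by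
        cases hh : pvSplitQ cs with
        | nil => exact absurd hh (pvSplitQ_ne_nil cs)
        | cons q qs => exact ⟨q, qs, rfl⟩
      simp only [pvG, pvSplitQ, hc, if_false, hqs, List.headI, List.tail, List.cons_append]
      rw [ih i b hb, hqs]
      simp

-- ===== VERDICT (by name: the statement is the Claim_ definition above) =====
theorem smart_quotes_py_spec : Claim_equal_smart_quotes_py := by
  intro text _
  unfold Spec_smart_quotes_py smart_quotes_py smart_quotes_py_alt
  by_cases h : text = ""
  · subst h; decide
  · simp only [h, if_false]
    rw [pv_splitOn_eq]
    obtain ⟨q, qs, hqs⟩ : ∃ q qs,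
        pvSplitQ (PySem.Chars.replace text.toList ['\''] ['’']) = q :: qs := by
      cases hh : pvSplitQ (PySem.Chars.replace text.toList ['\''] ['’']) with
      | nil => exact absurd hh (pvSplitQ_ne_nil _)
      | cons q qs => exact ⟨q, qs, rfl⟩
    simp only [hqs]
    rw [pv_foldA, pv_foldB]
    have := pv_main (PySem.Chars.replace text.toList ['\''] ['’']) 0 true (by decide)
    rw [hqs] at this
    simp only [List.headI, List.tail] at this
    simp [this]
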